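-- pv_equiv track=rewrite | github.com/trytodupe/ttd-bot | src/plugins/auto_ping/helpers.py | visible_targets
-- ===== SOURCE A (Python) =====
-- from typing import Iterable, Mapping
--
-- def visible_targets(
--     targets: Mapping[int, tuple[str, ...]],
--     visible_qqs: Iterable[int],
-- ) -> list[tuple[int, tuple[str, ...]]]:
--     visible = set(int(qq) for qq in visible_qqs)
--     return [
--         (qq, aliases)
--         for qq, aliases in sorted(targets.items())
--         if qq in visible
--     ]
-- ===== SOURCE B (Python) =====
-- def visible_targets(targets, visible_qqs):
--     visible = set(int(qq) for qq in visible_qqs)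
--     pairs = [(qq, targets[qq]) for qq in visible if qq in targets]
--     return sorted(pairs)
-- ===== Notes on version B (the rewrite author's own statement) =====
-- stated objective: faster
-- what changed: Instead of sorting all of targets.items() and then filtering by set membership, B iterates over the visible set itself, looking each key up in the dict, and sorts only the matched pairs.
import Mathlib
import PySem

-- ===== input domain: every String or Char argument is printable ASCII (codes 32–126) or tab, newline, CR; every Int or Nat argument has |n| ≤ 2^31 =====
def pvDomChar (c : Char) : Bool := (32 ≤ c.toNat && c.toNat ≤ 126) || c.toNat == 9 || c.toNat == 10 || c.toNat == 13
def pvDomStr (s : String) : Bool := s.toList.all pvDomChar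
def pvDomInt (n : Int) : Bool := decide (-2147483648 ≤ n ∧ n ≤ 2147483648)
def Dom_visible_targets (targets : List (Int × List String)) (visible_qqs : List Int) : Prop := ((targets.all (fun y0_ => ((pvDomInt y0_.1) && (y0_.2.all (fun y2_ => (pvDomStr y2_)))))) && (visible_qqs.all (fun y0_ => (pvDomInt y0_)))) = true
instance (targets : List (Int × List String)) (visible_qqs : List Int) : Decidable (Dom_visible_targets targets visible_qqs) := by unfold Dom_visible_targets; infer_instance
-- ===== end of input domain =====

-- B iterates over the visible set with dict lookups and sorts only the matched pairs,
-- instead of A's sort-everything-then-filter; an alternative decomposition, same results.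


-- ===== PORT A =====
-- visible = set(int(qq) for qq in visible_qqs); int(qq) is the identity on an int.
-- sorted(targets.items()) compares (key, aliases) tuples; under Pre_ the dict keys are
-- distinct, so the comparison is decided by the key alone: ported keyed on the first component.
def visible_targets (targets : List (Int × List String)) (visible_qqs : List Int) : List (Int × List String) :=
  let visible := PySem.Set.ofList visible_qqs
  (PySem.List.sorted targets (fun p => p.1) false).filter (fun p => visible.contains p.1)

-- ===== PORT B =====
-- '(qq, targets[qq]) for qq in visible if qq in targets': the guarded dict lookup is the
-- filterMap of get? (some exactly when 'qq in targets'); sorted(pairs) keyed on the first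
-- component — pairs built from a set have distinct keys, so the tuple compare is the key compare.
def visible_targets_alt (targets : List (Int × List String)) (visible_qqs : List Int) : List (Int × List String) :=
  let visible := PySem.Set.ofList visible_qqs
  let pairs := visible.filterMap (fun qq => ((PySem.Dict.mk targets).get? qq).map (fun a => (qq, a)))
  PySem.List.sorted pairs (fun p => p.1) false

-- ===== PRECONDITION & SPEC =====
-- Pre_ is the representation invariant of A's dict parameter: the association list stands for a
-- Python dict, whose keys are distinct; a duplicate-keyed list corresponds to no Python input.
def Pre_visible_targets (targets : List (Int × List String)) (visible_qqs : List Int) : Prop :=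
  (targets.map Prod.fst).Nodup
instance (targets : List (Int × List String)) (visible_qqs : List Int) : Decidable (Pre_visible_targets targets visible_qqs) := by unfold Pre_visible_targets; infer_instance
def pvWitness_visible_targets : (List (Int × List String)) × List Int := ([(3, ["a"]), (1, ["b", "c"])], [1, 7, 1])

def Spec_visible_targets (targets : List (Int × List String)) (visible_qqs : List Int) (out : List (Int × List String)) : Prop := out = visible_targets_alt targets visible_qqs
instance (targets : List (Int × List String)) (visible_qqs : List Int) (out : List (Int × List String)) : Decidable (Spec_visible_targets targets visible_qqs out) := by unfold Spec_visible_targets; infer_instance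

-- ===== CLAIM (what is proved, stated in full; the proofs are below) =====
def Claim_equal_visible_targets : Prop := ∀ (targets : List (Int × List String)) (visible_qqs : List Int), Dom_visible_targets targets visible_qqs → Pre_visible_targets targets visible_qqs → Spec_visible_targets targets visible_qqs (visible_targets targets visible_qqs)

-- ===== LEMMAS AND PROOFS =====

-- first-match dict lookup on a duplicate-free association list finds exactly the list's pairs
theorem get?_mk_eq_some_iff (l : List (Int × List String)) (h : (l.map Prod.fst).Nodup)
    (k : Int) (v : List String) :
    (PySem.Dict.mk l).get? k = some v ↔ (k, v) ∈ l := by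
  induction l with
  | nil => simp [PySem.Dict.get?]
  | cons p rest ih =>
    simp only [List.map_cons, List.nodup_cons] at h
    rw [PySem.Dict.get?_mk_cons]
    by_cases hk : p.1 = k
    · subst hk
      simp only [beq_self_eq_true, if_true, Option.some_inj, List.mem_cons]
      constructor
      · intro hv; left; rw [← hv]
      · rintro (hv | hv)
        · exact (Prod.ext_iff.mp hv.symm).2
        · exact absurd (List.mem_map_of_mem (f := Prod.fst) hv) (by simpa using h.1)
    · simp only [beq_iff_eq, hk, if_false, ih h.2, List.mem_cons]
      constructor
      · exact Or.inr
      · rintro (hv | hv)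
        · exact absurd (congrArg Prod.fst hv.symm) hk
        · exact hv

-- ===== VERDICT (by name: the statement is the Claim_ definition above) =====
theorem visible_targets_spec : Claim_equal_visible_targets := by
  intro targets visible_qqs _hdom hpre
  unfold Spec_visible_targets visible_targets visible_targets_alt
  unfold Pre_visible_targets at hpre
  set S := PySem.Set.ofList visible_qqs with hS
  set A := (PySem.List.sorted targets (fun p => p.1) false).filter
      (fun p => S.contains p.1) with hA
  set pairs := S.filterMap (fun qq => ((PySem.Dict.mk targets).get? qq).map (fun a => (qq, a)))
    with hpairs
  have hperm : (PySem.List.sorted targets (fun p => p.1) false).Perm targets :=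
    PySem.List.sorted_perm targets (fun p => p.1) false
  have hkeys : ((PySem.List.sorted targets (fun p => p.1) false).map Prod.fst).Nodup :=
    (hperm.map Prod.fst).nodup_iff.mpr hpre
  have hAkeys : (A.map Prod.fst).Nodup := by
    refine hkeys.sublist ?_
    exact List.Sublist.map Prod.fst List.filter_sublist
  -- membership characterisations: both lists hold exactly the visible pairs of targets
  have hmemA : ∀ p : Int × List String, p ∈ A ↔ p ∈ targets ∧ p.1 ∈ S := by
    intro p
    rw [hA, List.mem_filter, PySem.List.mem_sorted, PySem.Set.contains_iff]
  have hmemP : ∀ p : Int × List String, p ∈ pairs ↔ p ∈ targets ∧ p.1 ∈ S := by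
    intro p
    rw [hpairs, List.mem_filterMap]
    constructor
    · rintro ⟨qq, hqq, hf⟩
      simp only [Option.map_eq_some_iff] at hf
      obtain ⟨a, hget, rfl⟩ := hf
      exact ⟨(get?_mk_eq_some_iff targets hpre qq a).mp hget, hqq⟩
    · rintro ⟨hpt, hps⟩
      refine ⟨p.1, hps, ?_⟩
      simp only [Option.map_eq_some_iff]
      exact ⟨p.2, (get?_mk_eq_some_iff targets hpre p.1 p.2).mpr hpt, rfl⟩
  -- both lists are duplicate-free, hence they are permutations of each other
  have hAn : A.Nodup := hAkeys.of_map
  have hPn : pairs.Nodup := by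
    refine List.Nodup.filterMap ?_ (PySem.Set.nodup_ofList visible_qqs)
    intro a a' b hb hb'
    simp only [Option.mem_def, Option.map_eq_some_iff] at hb hb'
    obtain ⟨x, _, rfl⟩ := hb
    obtain ⟨y, _, h2⟩ := hb'
    exact (congrArg Prod.fst h2).symm
  have hpermAP : A.Perm pairs := by
    rw [List.perm_ext_iff_of_nodup hAn hPn]
    intro p; rw [hmemA, hmemP]
  -- A is strictly key-increasing, so sorting pairs restores exactly A
  have hle : A.Pairwise (fun a b : Int × List String => a.1 ≤ b.1) :=
    (PySem.List.sorted_pairwise targets (fun p => p.1)).filter _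
  have hne : A.Pairwise (fun a b : Int × List String => a.1 ≠ b.1) :=
    List.pairwise_map.mp hAkeys
  have hlt : A.Pairwise (fun a b : Int × List String => a.1 < b.1) :=
    (hle.and hne).imp (fun h => lt_of_le_of_ne h.1 h.2)
  exact (PySem.List.sorted_eq_of_perm_of_pairwise_lt pairs A (fun p => p.1) hpermAP hlt).symm
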